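-- pv_equiv track=rewrite | github.com/AnessFOUKA/Monochromatic | map Editor/main.py | surroundedByBracket
-- ===== SOURCE A (Python) =====
-- def surroundedByBracket(str,characterId):
--     temp=0
--     for i in range(0,len(str)):
--         if str[i]=="[":
--             temp+=1
--         elif str[i]=="]":
--             temp-=1
--         elif temp>0 and i==characterId:
--             return True
--     return False
-- ===== SOURCE B (Python) =====
-- def _bal(s):
--     # net bracket balance of s by divide and conquer: split in half, sum the halves
--     if len(s) <= 1:
--         return 1 if s == '[' else (-1 if s == ']' else 0)
--     m = len(s) // 2
--     return _bal(s[:m]) + _bal(s[m:])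
--
-- def surroundedByBracket(str, characterId):
--     # guards, then a divide-and-conquer balance of the prefix before characterId
--     if characterId < 0 or characterId >= len(str):
--         return False
--     c = str[characterId]
--     if c == '[' or c == ']':
--         return False
--     return _bal(str[:characterId]) > 0
-- ===== Notes on version B (the rewrite author's own statement) =====
-- stated objective: alternative
-- what changed: Replaces A's single left-to-right stateful depth loop with early return by guards (index in range, non-bracket char) plus a divide-and-conquer computation of the bracket balance of the prefix before characterId (split the prefix in half, recurse, add).
import Mathlib
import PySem

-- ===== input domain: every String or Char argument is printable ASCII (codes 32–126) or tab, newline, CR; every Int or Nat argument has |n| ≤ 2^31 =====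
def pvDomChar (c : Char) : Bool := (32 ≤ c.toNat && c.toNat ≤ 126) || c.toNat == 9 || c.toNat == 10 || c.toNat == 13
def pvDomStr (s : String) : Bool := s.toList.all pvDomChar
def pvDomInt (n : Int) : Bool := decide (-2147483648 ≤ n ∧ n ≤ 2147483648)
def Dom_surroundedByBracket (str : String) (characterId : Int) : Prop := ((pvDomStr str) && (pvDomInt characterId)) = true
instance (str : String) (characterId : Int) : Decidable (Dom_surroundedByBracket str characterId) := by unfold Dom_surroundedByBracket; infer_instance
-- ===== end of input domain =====

-- B replaces A's stateful running-depth loop by guards plus a divide-and-conquer balance of the prefix before characterId (alternative decomposition, same cost).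


-- ===== PORT A =====
-- A's for-loop over range(0, len(str)) with running depth `temp` and early return.
def pvGoA : List Char → Nat → Int → Int → Bool
  | [], _, _, _ => false
  | c :: rest, i, temp, cid =>
    if c = '[' then pvGoA rest (i + 1) (temp + 1) cid
    else if c = ']' then pvGoA rest (i + 1) (temp - 1) cid
    else if temp > 0 ∧ (i : Int) = cid then true
    else pvGoA rest (i + 1) temp cid

def surroundedByBracket (str : String) (characterId : Int) : Bool :=
  pvGoA str.toList 0 0 characterId

-- ===== PORT B =====
-- Source B's _bal: divide-and-conquer bracket balance (split in half, recurse, add).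
def pvBal (s : List Char) : Int :=
  if h : s.length ≤ 1 then
    (if s = ['['] then 1 else if s = [']'] then -1 else 0)
  else
    pvBal (s.take (s.length / 2)) + pvBal (s.drop (s.length / 2))
termination_by s.length
decreasing_by
  · simp only [List.length_take]; omega
  · simp only [List.length_drop]; omega

-- Source B: guards, then _bal(str[:characterId]) > 0.
-- str[characterId] is ported as getD: exact here since the guard ensures the index is in range.
def surroundedByBracket_alt (str : String) (characterId : Int) : Bool :=
  if characterId < 0 ∨ (str.toList.length : Int) ≤ characterId then false
  else
    let j := characterId.toNat
    let c := str.toList.getD j ' '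
    if c = '[' ∨ c = ']' then false
    else decide (pvBal (str.toList.take j) > 0)

-- ===== PRECONDITION & SPEC =====
def Spec_surroundedByBracket (str : String) (characterId : Int) (out : Bool) : Prop := out = surroundedByBracket_alt str characterId
instance (str : String) (characterId : Int) (out : Bool) : Decidable (Spec_surroundedByBracket str characterId out) := by unfold Spec_surroundedByBracket; infer_instance

-- ===== CLAIM (what is proved, stated in full; the proofs are below) =====
def Claim_equal_surroundedByBracket : Prop := ∀ (str : String) (characterId : Int), Dom_surroundedByBracket str characterId → Spec_surroundedByBracket str characterId (surroundedByBracket str characterId)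

-- ===== LEMMAS AND PROOFS =====

-- The divide-and-conquer balance equals #'[' minus #']'.
theorem pvBal_count (s : List Char) : pvBal s = (s.count '[' : Int) - (s.count ']' : Int) := by
  fun_induction pvBal s with
  | case1 h => simp
  | case2 h h1 => simp
  | case3 s h h1 h2 =>
    match s, h, h1, h2 with
    | [], _, _, _ => simp
    | [c], _, h1, h2 =>
      have hc1 : c ≠ '[' := by intro hc; exact h1 (by rw [hc])
      have hc2 : c ≠ ']' := by intro hc; exact h2 (by rw [hc])
      simp [hc1, hc2]
  | case4 s h ih1 ih2 =>
    rw [ih1, ih2]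
    have ha : (s.take (s.length / 2)).count '[' + (s.drop (s.length / 2)).count '[' = s.count '[' := by
      rw [← List.count_append, List.take_append_drop]
    have hb : (s.take (s.length / 2)).count ']' + (s.drop (s.length / 2)).count ']' = s.count ']' := by
      rw [← List.count_append, List.take_append_drop]
    omega

-- Characterisation of A's loop: from position i with running depth temp, it returns true
-- iff cid names an in-range, non-bracket position j and temp plus the bracket balance of
-- the prefix before j is positive.
theorem pvGoA_spec (cs : List Char) (cid : Int) : ∀ (i : Nat) (temp : Int),
    pvGoA cs i temp cid =
      if 0 ≤ cid - (i : Int) ∧ cid - (i : Int) < (cs.length : Int) then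
        let j := (cid - (i : Int)).toNat
        if cs.getD j ' ' = '[' ∨ cs.getD j ' ' = ']' then false
        else decide (temp + (((cs.take j).count '[' : Int) - ((cs.take j).count ']' : Int)) > 0)
      else false := by
  induction cs with
  | nil =>
    intro i temp
    simp [pvGoA]
  | cons c rest ih =>
    intro i temp
    by_cases h0 : cid = (i : Int)
    · subst h0
      by_cases hc1 : c = '['
      · subst hc1
        simp [pvGoA, ih (i + 1) (temp + 1)]
      · by_cases hc2 : c = ']'
        · subst hc2
          simp [pvGoA, hc1, ih (i + 1) (temp - 1)]
        · simp [pvGoA, hc1, hc2]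
          by_cases ht : temp > 0
          · simp [ht]
          · simp [ht, ih (i + 1) temp]
    · have hj : ¬ ((cid - (i : Int)).toNat = 0 ∧ 0 ≤ cid - (i : Int)) := by omega
      by_cases hr : 0 ≤ cid - (i : Int) ∧ cid - (i : Int) < ((c :: rest).length : Int)
      · -- cid points strictly after i into rest
        have hpos : 1 ≤ cid - (i : Int) := by omega
        have hjk : (cid - (i : Int)).toNat = ((cid - ((i : Int) + 1)).toNat) + 1 := by omega
        by_cases hc1 : c = '['
        · subst hc1
          simp only [pvGoA, ih (i + 1) (temp + 1)]
          have : 0 ≤ cid - ((i : Int) + 1) ∧ cid - ((i : Int) + 1) < (rest.length : Int) := by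
            simp [List.length] at hr; omega
          simp only [if_pos hr, Nat.cast_add, Nat.cast_one, if_pos this, hjk]
          simp
          congr 1
          rw [decide_eq_decide]
          omega
        · by_cases hc2 : c = ']'
          · subst hc2
            simp only [pvGoA, hc1, ih (i + 1) (temp - 1)]
            have : 0 ≤ cid - ((i : Int) + 1) ∧ cid - ((i : Int) + 1) < (rest.length : Int) := by
              simp [List.length] at hr; omega
            simp only [if_pos hr, Nat.cast_add, Nat.cast_one, if_pos this, hjk]
            simp
            congr 1
            rw [decide_eq_decide]
            omega
          · have hne : ¬ (temp > 0 ∧ (i : Int) = cid) := by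
              intro h; exact h0 h.2.symm
            simp only [pvGoA, if_neg hc1, if_neg hc2, if_neg hne, ih (i + 1) temp]
            have : 0 ≤ cid - ((i : Int) + 1) ∧ cid - ((i : Int) + 1) < (rest.length : Int) := by
              simp [List.length] at hr; omega
            simp only [if_pos hr, Nat.cast_add, Nat.cast_one, if_pos this, hjk]
            simp [hc1, hc2]
      · -- out of range: both sides false
        have hr' : ¬ (0 ≤ cid - ((i : Int) + 1) ∧ cid - ((i : Int) + 1) < (rest.length : Int)) := by
          simp [List.length] at hr ⊢; omega
        by_cases hc1 : c = '['
        · subst hc1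
          simp only [pvGoA, ih (i + 1) (temp + 1)]
          simp only [if_neg hr]
          push_cast
          rw [if_neg hr']
        · by_cases hc2 : c = ']'
          · subst hc2
            simp only [pvGoA, hc1, ih (i + 1) (temp - 1)]
            simp only [if_neg hr]
            push_cast
            rw [if_neg hr']
          · have hne : ¬ (temp > 0 ∧ (i : Int) = cid) := by
              intro h; exact h0 h.2.symm
            simp only [pvGoA, if_neg hc1, if_neg hc2, if_neg hne, ih (i + 1) temp]
            simp only [if_neg hr]
            push_cast
            rw [if_neg hr']

-- ===== VERDICT (by name: the statement is the Claim_ definition above) =====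
theorem surroundedByBracket_spec : Claim_equal_surroundedByBracket := by
  intro str cid _
  unfold Spec_surroundedByBracket surroundedByBracket surroundedByBracket_alt
  rw [pvGoA_spec]
  simp only [Nat.cast_zero, sub_zero, pvBal_count]
  by_cases h : 0 ≤ cid ∧ cid < (str.toList.length : Int)
  · have hg : ¬ (cid < 0 ∨ (str.toList.length : Int) ≤ cid) := by omega
    rw [if_pos h, if_neg hg]
    simp only [zero_add]
  · have hg : cid < 0 ∨ (str.toList.length : Int) ≤ cid := by omega
    rw [if_neg h, if_pos hg]
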